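-- pv_equiv track=rewrite | github.com/BingoBingoZ/llm4ad | llm4ad/task/optimization/fjsp_construct2/GcodeTest/N_RunSlectCode_2stage .py | is_valid_schedule
-- ===== SOURCE A (Python) =====
-- def is_valid_schedule(schedule, n_jobs, n_machines):
--     """检查调度是否有效"""
--     # 1. 检查作业内部工序顺序约束
--     for job_id in range(n_jobs):
--         for op_idx in range(len(schedule[job_id]) - 1):
--             if schedule[job_id][op_idx][2] > schedule[job_id][op_idx+1][1]:
--                 return False
--
--     # 2. 检查机器资源冲突
--     for machine_id in range(n_machines):
--         ops_on_machine = []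
--         for job_id in range(n_jobs):
--             for op_idx, (m_id, start, end) in enumerate(schedule[job_id]):
--                 if m_id == machine_id:
--                     ops_on_machine.append((start, end, job_id, op_idx))
--
--         # 按开始时间排序
--         ops_on_machine.sort()
--
--         # 检查重叠
--         for i in range(len(ops_on_machine) - 1):
--             if ops_on_machine[i][1] > ops_on_machine[i+1][0]:
--                 return False  # 发现重叠
--
--     return True
-- ===== SOURCE B (Python) =====
-- def is_valid_schedule(schedule, n_jobs, n_machines):
--     # 1. per-job precedence check
--     for job_id in range(n_jobs):
--         ops = schedule[job_id]
--         if any(a[2] > b[1] for a, b in zip(ops, ops[1:])):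
--             return False
--     # 2. one pass bucketing ops by machine, then sort/overlap-check each bucket
--     pairs = [(m, (s, e, job_id, op_idx))
--              for job_id in range(n_jobs)
--              for op_idx, (m, s, e) in enumerate(schedule[job_id])
--              if 0 <= m < n_machines]
--     buckets = {}
--     for m, op in pairs:
--         buckets.setdefault(m, []).append(op)
--     for ops in buckets.values():
--         ops.sort()
--         if any(a[1] > b[0] for a, b in zip(ops, ops[1:])):
--             return False
--     return True
-- ===== Notes on version B (the rewrite author's own statement) =====
-- stated objective: faster
-- what changed: Instead of rescanning the entire schedule once per machine id (n_machines passes), B makes one pass collecting every op into a per-machine bucket dict, then sorts and overlap-checks each non-empty bucket; the per-job precedence check is done with zip over adjacent pairs.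
import Mathlib
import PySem

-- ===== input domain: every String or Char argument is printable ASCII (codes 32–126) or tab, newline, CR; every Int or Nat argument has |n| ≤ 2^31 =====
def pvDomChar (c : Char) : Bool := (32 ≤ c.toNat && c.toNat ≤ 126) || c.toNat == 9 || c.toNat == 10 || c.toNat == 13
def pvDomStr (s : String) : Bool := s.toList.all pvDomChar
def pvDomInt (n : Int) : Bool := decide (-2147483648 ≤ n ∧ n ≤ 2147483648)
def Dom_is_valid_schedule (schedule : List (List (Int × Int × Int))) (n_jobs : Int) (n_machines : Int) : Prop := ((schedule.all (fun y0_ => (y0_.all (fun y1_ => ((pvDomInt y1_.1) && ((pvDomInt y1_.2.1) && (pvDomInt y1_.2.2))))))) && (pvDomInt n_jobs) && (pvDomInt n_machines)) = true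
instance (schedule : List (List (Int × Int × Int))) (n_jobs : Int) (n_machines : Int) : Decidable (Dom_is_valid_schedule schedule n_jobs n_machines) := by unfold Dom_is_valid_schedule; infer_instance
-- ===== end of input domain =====

-- B replaces A's per-machine rescans of the whole schedule by a single bucketing pass
-- (a dict of per-machine op lists), then sorts/overlap-checks each bucket; equality of
-- the return value on Pre_ is proved below.
-- In both ports the job ranges 'range(n_jobs)' are clamped to the rows that exist
-- ('min n_jobs len(schedule)'): past them Python raises IndexError (outside Pre_; inside
-- Pre_ the clamp is the identity), and the clamp keeps evaluation total.

-- ===== PORT A =====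
-- Python's lexicographic order on the 4-tuples (start, end, job_id, op_idx) that list.sort() compares
def tupKey (x : Int × Int × Int × Int) : Int ×ₗ Int ×ₗ Int ×ₗ Int :=
  toLex (x.1, toLex (x.2.1, toLex (x.2.2.1, x.2.2.2)))

def is_valid_schedule (schedule : List (List (Int × Int × Int))) (n_jobs : Int) (n_machines : Int) : Bool :=
  ((PySem.List.pyRange 0 (min n_jobs (schedule.length : Int)) 1).all fun job_id =>
    let ops := PySem.List.pyGetD schedule job_id []
    (PySem.List.pyRange 0 ((ops.length : Int) - 1) 1).all fun i =>
      !(decide ((PySem.List.pyGetD ops i (0,0,0)).2.2 > (PySem.List.pyGetD ops (i+1) (0,0,0)).2.1)))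
  &&
  ((PySem.List.pyRange 0 n_machines 1).all fun machine_id =>
    let ops_on_machine :=
      (PySem.List.pyRange 0 (min n_jobs (schedule.length : Int)) 1).foldl (fun acc job_id =>
        (PySem.List.enumerate (PySem.List.pyGetD schedule job_id [])).foldl (fun acc q =>
          if q.2.1 == machine_id then acc ++ [(q.2.2.1, q.2.2.2, job_id, q.1)] else acc) acc) []
    let s := PySem.List.sorted ops_on_machine tupKey
    (PySem.List.pyRange 0 ((s.length : Int) - 1) 1).all fun i =>
      !(decide ((PySem.List.pyGetD s i (0,0,0,0)).2.1 > (PySem.List.pyGetD s (i+1) (0,0,0,0)).1)))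

def is_valid_schedule_alt (schedule : List (List (Int × Int × Int))) (n_jobs : Int) (n_machines : Int) : Bool :=
  ((PySem.List.pyRange 0 (min n_jobs (schedule.length : Int)) 1).all fun job_id =>
    let ops := PySem.List.pyGetD schedule job_id []
    (ops.zip ops.tail).all fun q => !(decide (q.1.2.2 > q.2.2.1)))
  &&
  (let pairs := (PySem.List.pyRange 0 (min n_jobs (schedule.length : Int)) 1).flatMap fun job_id =>
      ((PySem.List.enumerate (PySem.List.pyGetD schedule job_id [])).filter fun q =>
          decide (0 ≤ q.2.1) && decide (q.2.1 < n_machines)).map fun q =>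
        (q.2.1, (q.2.2.1, q.2.2.2, job_id, q.1))
   let buckets := pairs.foldl (fun d p => d.modify p.1 [] (· ++ [p.2]))
      (PySem.Dict.empty : PySem.Dict Int (List (Int × Int × Int × Int)))
   buckets.values.all fun ops =>
     let s := PySem.List.sorted ops tupKey
     (s.zip s.tail).all fun q => !(decide (q.1.2.1 > q.2.1)))


-- ===== PRECONDITION & SPEC =====
-- Exactly the inputs on which A returns: either all indexed rows exist (n_jobs ≤ len(schedule)),
-- or some row contains an adjacent precedence violation, so A returns False before its
-- schedule[job_id] indexing can run past the end and raise IndexError.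
def Pre_is_valid_schedule (schedule : List (List (Int × Int × Int))) (n_jobs : Int) (n_machines : Int) : Prop :=
  n_jobs ≤ (schedule.length : Int) ∨
    (schedule.any fun row => (row.zip row.tail).any fun q => decide (q.1.2.2 > q.2.2.1)) = true
instance (schedule : List (List (Int × Int × Int))) (n_jobs : Int) (n_machines : Int) : Decidable (Pre_is_valid_schedule schedule n_jobs n_machines) := by unfold Pre_is_valid_schedule; infer_instance
def pvWitness_is_valid_schedule : (List (List (Int × Int × Int))) × Int × Int :=
  ([[(0, 0, 3), (1, 3, 5)], [(0, 4, 6)]], 2, 2)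
def Spec_is_valid_schedule (schedule : List (List (Int × Int × Int))) (n_jobs : Int) (n_machines : Int) (out : Bool) : Prop := out = is_valid_schedule_alt schedule n_jobs n_machines
instance (schedule : List (List (Int × Int × Int))) (n_jobs : Int) (n_machines : Int) (out : Bool) : Decidable (Spec_is_valid_schedule schedule n_jobs n_machines out) := by unfold Spec_is_valid_schedule; infer_instance

-- ===== CLAIM (what is proved, stated in full; the proofs are below) =====
def Claim_equal_is_valid_schedule : Prop := ∀ (schedule : List (List (Int × Int × Int))) (n_jobs : Int) (n_machines : Int), Dom_is_valid_schedule schedule n_jobs n_machines → Pre_is_valid_schedule schedule n_jobs n_machines → Spec_is_valid_schedule schedule n_jobs n_machines (is_valid_schedule schedule n_jobs n_machines)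

-- ===== LEMMAS AND PROOFS =====

theorem adj_nat {α : Type} (p : α → α → Bool) (d : α) (xs : List α) :
    ((List.range (xs.length - 1)).all fun k => p (xs.getD k d) (xs.getD (k+1) d))
    = (xs.zip xs.tail).all fun q => p q.1 q.2 := by
  induction xs with
  | nil => rfl
  | cons x t ih =>
    cases t with
    | nil => rfl
    | cons y t' =>
      have h1 : (x :: y :: t').length - 1 = ((y :: t').length - 1) + 1 := by simp
      rw [h1, List.range_succ_eq_map, List.all_cons, List.all_map]
      have h3 : ((fun k => p ((x :: y :: t').getD k d) ((x :: y :: t').getD (k + 1) d)) ∘ Nat.succ)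
          = fun k => p ((y :: t').getD k d) ((y :: t').getD (k + 1) d) := by
        funext k
        simp [Function.comp]
      rw [h3, ih]
      rfl

theorem adj_range_eq_zip {α : Type} (xs : List α) (d : α) (p : α → α → Bool) :
    ((PySem.List.pyRange 0 ((xs.length : Int) - 1) 1).all fun i =>
      p (PySem.List.pyGetD xs i d) (PySem.List.pyGetD xs (i+1) d))
    = (xs.zip xs.tail).all fun q => p q.1 q.2 := by
  rw [PySem.List.pyRange_one, List.all_map, ← adj_nat p d xs]
  apply List.all_congr
  · congr 1; omega
  · intro k
    simp only [Function.comp, zero_add]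
    have h1 : ((k : Int) + 1) = ((k + 1 : Nat) : Int) := by push_cast; ring
    rw [h1, PySem.List.pyGetD_natCast, PySem.List.pyGetD_natCast]

theorem adjA1 (ops : List (Int × Int × Int)) :
    ((PySem.List.pyRange 0 ((ops.length : Int) - 1) 1).all fun i =>
      !(decide ((PySem.List.pyGetD ops i (0,0,0)).2.2 > (PySem.List.pyGetD ops (i+1) (0,0,0)).2.1)))
    = (ops.zip ops.tail).all fun q => !(decide (q.1.2.2 > q.2.2.1)) :=
  adj_range_eq_zip ops (0,0,0) (fun a b => !(decide (a.2.2 > b.2.1)))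

theorem adjA2 (s : List (Int × Int × Int × Int)) :
    ((PySem.List.pyRange 0 ((s.length : Int) - 1) 1).all fun i =>
      !(decide ((PySem.List.pyGetD s i (0,0,0,0)).2.1 > (PySem.List.pyGetD s (i+1) (0,0,0,0)).1)))
    = (s.zip s.tail).all fun q => !(decide (q.1.2.1 > q.2.1)) :=
  adj_range_eq_zip s (0,0,0,0) (fun a b => !(decide (a.2.1 > b.1)))

theorem all_congr_mem {α : Type} (l : List α) {f g : α → Bool} (h : ∀ x ∈ l, f x = g x) :
    l.all f = l.all g := by
  rw [Bool.eq_iff_iff]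
  simp only [List.all_eq_true]
  constructor <;> intro H x hx
  · rw [← h x hx]; exact H x hx
  · rw [h x hx]; exact H x hx

theorem all_of_subset (l₁ l₂ : List Int) (F : Int → Bool)
    (hsub : ∀ x ∈ l₂, x ∈ l₁) (hoff : ∀ x ∈ l₁, x ∉ l₂ → F x = true) :
    l₁.all F = l₂.all F := by
  rw [Bool.eq_iff_iff]
  simp only [List.all_eq_true]
  constructor
  · intro h x hx; exact h x (hsub x hx)
  · intro h x hx
    by_cases hm : x ∈ l₂
    · exact h x hm
    · exact hoff x hx hm

theorem ab_eq (schedule : List (List (Int × Int × Int))) (n_jobs : Int) (n_machines : Int) :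
    is_valid_schedule schedule n_jobs n_machines = is_valid_schedule_alt schedule n_jobs n_machines := by
  simp only [is_valid_schedule, is_valid_schedule_alt]
  congr 1
  · exact List.all_congr rfl (fun job_id => adjA1 (PySem.List.pyGetD schedule job_id []))
  · -- machine part
    set pairs := (PySem.List.pyRange 0 (min n_jobs (schedule.length : Int)) 1).flatMap (fun job_id =>
      ((PySem.List.enumerate (PySem.List.pyGetD schedule job_id [])).filter fun q =>
          decide (0 ≤ q.2.1) && decide (q.2.1 < n_machines)).map fun q =>
        (q.2.1, (q.2.2.1, q.2.2.2, job_id, q.1))) with hpairs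
    set buckets := pairs.foldl (fun d p => d.modify p.1 [] (· ++ [p.2]))
      (PySem.Dict.empty : PySem.Dict Int (List (Int × Int × Int × Int))) with hbuck
    have hB : ∀ m : Int, buckets.getD m [] = (pairs.filter (fun p => p.1 == m)).map (·.2) := by
      intro m
      rw [hbuck, PySem.Dict.getD_foldl_modify_append]
      rfl
    have hkeys : buckets.keys = PySem.Set.ofList (pairs.map (·.1)) := by
      rw [hbuck]
      exact PySem.Dict.keys_foldl_modify_key pairs (fun p => p.1) [] (fun _ p => (· ++ [p.2])) PySem.Dict.empty
    have hnodup : buckets.keys.Nodup := by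
      rw [hbuck]
      exact PySem.Dict.nodup_keys_foldl_modify_key pairs (fun p => p.1) [] (fun _ p => (· ++ [p.2])) PySem.Dict.empty List.nodup_nil
    have hvals : buckets.values = buckets.keys.map (fun k => buckets.getD k []) :=
      PySem.Dict.values_eq_map_keys buckets hnodup []
    have hmemfst : ∀ p ∈ pairs, 0 ≤ p.1 ∧ p.1 < n_machines := by
      intro p hp
      rw [hpairs] at hp
      obtain ⟨j, hj, hp⟩ := List.mem_flatMap.mp hp
      obtain ⟨q, hq, rfl⟩ := List.mem_map.mp hp
      have := (List.mem_filter.mp hq).2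
      simp only [Bool.and_eq_true, decide_eq_true_eq] at this
      exact this
    have hsub : ∀ k ∈ buckets.keys, k ∈ PySem.List.pyRange 0 n_machines 1 := by
      intro k hk
      rw [hkeys, PySem.Set.mem_ofList] at hk
      obtain ⟨p, hp, rfl⟩ := List.mem_map.mp hk
      exact PySem.List.mem_pyRange_one.mpr (hmemfst p hp)
    have hoff : ∀ m : Int, m ∉ buckets.keys → buckets.getD m [] = [] := by
      intro m hm
      rw [hB]
      have : pairs.filter (fun p => p.1 == m) = [] := by
        rw [List.filter_eq_nil_iff]
        intro p hp hpe
        exact hm (by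
          rw [hkeys, PySem.Set.mem_ofList]
          exact List.mem_map.mpr ⟨p, hp, (beq_iff_eq.mp hpe)⟩)
      rw [this]; rfl
    have hAB : ∀ m ∈ PySem.List.pyRange 0 n_machines 1,
        ((PySem.List.pyRange 0 (min n_jobs (schedule.length : Int)) 1).foldl (fun acc job_id =>
          (PySem.List.enumerate (PySem.List.pyGetD schedule job_id [])).foldl (fun acc q =>
            if q.2.1 == m then acc ++ [(q.2.2.1, q.2.2.2, job_id, q.1)] else acc) acc) [])
        = buckets.getD m [] := by
      intro m hm
      obtain ⟨h0, h1⟩ := PySem.List.mem_pyRange_one.mp hm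
      have hinner : ∀ (acc : List (Int × Int × Int × Int)) (j : Int),
          (PySem.List.enumerate (PySem.List.pyGetD schedule j [])).foldl (fun acc q =>
            if q.2.1 == m then acc ++ [(q.2.2.1, q.2.2.2, j, q.1)] else acc) acc
          = acc ++ ((PySem.List.enumerate (PySem.List.pyGetD schedule j [])).filter
              (fun q => q.2.1 == m)).map (fun q => (q.2.2.1, q.2.2.2, j, q.1)) := by
        intro acc j
        exact PySem.List.foldl_append_if _ _ _ _
      simp only [hinner]
      rw [PySem.List.foldl_append_eq_flatMap, List.nil_append, hB, hpairs,
        List.filter_flatMap, List.map_flatMap]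
      apply List.flatMap_congr ?_
      intro j hj
      rw [List.filter_map, List.map_map, List.filter_filter]
      congr 1
      apply List.filter_congr
      intro q hq
      show (q.2.1 == m) = ((q.2.1 == m) && (decide (0 ≤ q.2.1) && decide (q.2.1 < n_machines)))
      by_cases hqe : q.2.1 = m
      · simp [hqe, h0, h1]
      · simp [hqe]
    have hempty : ((PySem.List.sorted ([] : List (Int × Int × Int × Int)) tupKey).zip
        (PySem.List.sorted ([] : List (Int × Int × Int × Int)) tupKey).tail).all
        (fun q => !(decide (q.1.2.1 > q.2.1))) = true := rfl
    calc ((PySem.List.pyRange 0 n_machines 1).all fun machine_id =>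
            let ops_on_machine :=
              (PySem.List.pyRange 0 (min n_jobs (schedule.length : Int)) 1).foldl (fun acc job_id =>
                (PySem.List.enumerate (PySem.List.pyGetD schedule job_id [])).foldl (fun acc q =>
                  if q.2.1 == machine_id then acc ++ [(q.2.2.1, q.2.2.2, job_id, q.1)] else acc) acc) []
            let s := PySem.List.sorted ops_on_machine tupKey
            (PySem.List.pyRange 0 ((s.length : Int) - 1) 1).all fun i =>
              !(decide ((PySem.List.pyGetD s i (0,0,0,0)).2.1 > (PySem.List.pyGetD s (i+1) (0,0,0,0)).1)))
        = (PySem.List.pyRange 0 n_machines 1).all (fun m =>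
            ((PySem.List.sorted (buckets.getD m []) tupKey).zip
              (PySem.List.sorted (buckets.getD m []) tupKey).tail).all
              (fun q => !(decide (q.1.2.1 > q.2.1)))) := by
          apply all_congr_mem
          intro m hm
          rw [adjA2, hAB m hm]
      _ = buckets.keys.all (fun m =>
            ((PySem.List.sorted (buckets.getD m []) tupKey).zip
              (PySem.List.sorted (buckets.getD m []) tupKey).tail).all
              (fun q => !(decide (q.1.2.1 > q.2.1)))) := by
          apply all_of_subset _ _ _ hsub
          intro m _ hmk
          rw [hoff m hmk]
          exact hempty
      _ = buckets.values.all (fun ops =>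
            ((PySem.List.sorted ops tupKey).zip (PySem.List.sorted ops tupKey).tail).all
              (fun q => !(decide (q.1.2.1 > q.2.1)))) := by
          rw [hvals, List.all_map]
          rfl

-- ===== VERDICT (by name: the statement is the Claim_ definition above) =====
theorem is_valid_schedule_spec : Claim_equal_is_valid_schedule := by
  intro schedule n_jobs n_machines _ _
  exact ab_eq schedule n_jobs n_machines
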